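-- pv_equiv track=rewrite | github.com/mauriciocucco/gaia | src/hf_gaia_agent/source_pipeline/evidence_normalizer.py | _split_rendered_tables
-- ===== SOURCE A (Python) =====
-- def _split_rendered_tables(content: str) -> list[str]:
--     sections: list[str] = []
--     current: list[str] = []
--     for raw_line in content.splitlines():
--         line = raw_line.rstrip()
--         if line.startswith(("URL:", "URL Source:", "Title:", "Published:", "Published Time:")):
--             continue
--         if line.startswith("Table ") and current:
--             sections.append("\n".join(current).strip())
--             current = [line]
--             continue
--         current.append(line)
--     if current:
--         sections.append("\n".join(current).strip())
--     return [section for section in sections if section]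
-- ===== SOURCE B (Python) =====
-- def _split_rendered_tables(content: str) -> list[str]:
--     meta = ("URL:", "URL Source:", "Title:", "Published:", "Published Time:")
--     filtered = [line.rstrip() for line in content.splitlines()
--                 if not line.rstrip().startswith(meta)]
--     bounds = [i for i, l in enumerate(filtered) if l.startswith("Table ") and i > 0]
--     edges = [0] + bounds + [len(filtered)]
--     chunks = [filtered[a:b] for a, b in zip(edges, edges[1:])]
--     sections = ["\n".join(chunk).strip() for chunk in chunks]
--     return [section for section in sections if section]
-- ===== Notes on version B (the rewrite author's own statement) =====
-- stated objective: alternative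
-- what changed: Replaces A's running-accumulator loop (current/sections state) with an index-then-slice decomposition: build the filtered line list once, collect the 'Table ' boundary indices, and slice the list into chunks at those indices.
import Mathlib
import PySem

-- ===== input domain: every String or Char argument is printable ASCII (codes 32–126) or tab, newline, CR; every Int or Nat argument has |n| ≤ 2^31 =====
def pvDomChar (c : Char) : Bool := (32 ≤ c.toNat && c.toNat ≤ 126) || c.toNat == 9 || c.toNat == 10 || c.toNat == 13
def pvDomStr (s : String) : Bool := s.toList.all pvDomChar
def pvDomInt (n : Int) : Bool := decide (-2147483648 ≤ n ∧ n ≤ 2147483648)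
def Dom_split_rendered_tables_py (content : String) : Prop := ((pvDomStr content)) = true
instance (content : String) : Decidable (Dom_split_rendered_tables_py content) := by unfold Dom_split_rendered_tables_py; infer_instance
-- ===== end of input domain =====

-- B replaces A's running-accumulator loop by an index-then-slice decomposition (filter lines, find "Table " boundary indices, slice into chunks); objective: alternative structure, same cost.

-- ===== PORT A =====
def pvMeta : List String := ["URL:", "URL Source:", "Title:", "Published:", "Published Time:"]

-- body of A's for-loop ('continue' on a metadata line = return the state unchanged)
def pvStepA (acc : List String × List String) (raw : String) : List String × List String :=
  let line := PySem.Str.rstrip raw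
  if pvMeta.any (fun p => PySem.Str.startswith line p) then acc
  else if PySem.Str.startswith line "Table " && !acc.2.isEmpty then
    (acc.1 ++ [PySem.Str.strip (PySem.Str.join "\n" acc.2)], [line])
  else (acc.1, acc.2 ++ [line])

def split_rendered_tables_py (content : String) : List String :=
  let r := (PySem.Str.splitlines content).foldl pvStepA ([], [])
  let sections := if !r.2.isEmpty then r.1 ++ [PySem.Str.strip (PySem.Str.join "\n" r.2)] else r.1
  sections.filter (fun s => s ≠ "")

-- ===== PORT B =====
-- Source B's 'filtered' comprehension
def pvFiltered (content : String) : List String :=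
  ((PySem.Str.splitlines content).filter
      (fun line => !(pvMeta.any (fun p => PySem.Str.startswith (PySem.Str.rstrip line) p)))).map
    PySem.Str.rstrip

def split_rendered_tables_py_alt (content : String) : List String :=
  let filtered := pvFiltered content
  let bounds := (PySem.List.enumerate filtered 0).filterMap
      (fun il => if PySem.Str.startswith il.2 "Table " && decide (il.1 > 0) then some il.1 else none)
  let edges := (0 : Int) :: bounds ++ [(filtered.length : Int)]
  let chunks := (edges.zip edges.tail).map
      (fun ab => PySem.List.slice filtered (some ab.1) (some ab.2))
  let sections := chunks.map (fun chunk => PySem.Str.strip (PySem.Str.join "\n" chunk))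
  sections.filter (fun s => s ≠ "")

-- ===== PRECONDITION & SPEC =====
def Spec_split_rendered_tables_py (content : String) (out : List String) : Prop := out = split_rendered_tables_py_alt content
instance (content : String) (out : List String) : Decidable (Spec_split_rendered_tables_py content out) := by unfold Spec_split_rendered_tables_py; infer_instance

-- ===== CLAIM (what is proved, stated in full; the proofs are below) =====
def Claim_equal_split_rendered_tables_py : Prop := ∀ (content : String), Dom_split_rendered_tables_py content → Spec_split_rendered_tables_py content (split_rendered_tables_py content)

-- ===== LEMMAS AND PROOFS =====
-- proof helpers: pvG joins-and-strips a chunk, pvP is the "Table " test,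
-- pvStep2 is A's loop body on already-filtered lines, pvChunksRec the recursive chunking,
-- pvPosns the boundary positions, pvSliceChunks the slice-at-edges combinator.
def pvG (c : List String) : String := PySem.Str.strip (PySem.Str.join "\n" c)
def pvP (l : String) : Bool := PySem.Str.startswith l "Table "

def pvStep2 (acc : List String × List String) (line : String) : List String × List String :=
  if pvP line && !acc.2.isEmpty then (acc.1 ++ [pvG acc.2], [line]) else (acc.1, acc.2 ++ [line])

def pvFinalize (r : List String × List String) : List String :=
  if !r.2.isEmpty then r.1 ++ [pvG r.2] else r.1

def pvChunksRec (cur : List String) : List String → List (List String)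
  | [] => [cur]
  | l :: rest => if pvP l then cur :: pvChunksRec [l] rest else pvChunksRec (cur ++ [l]) rest

def pvPosns : List String → List Nat
  | [] => []
  | l :: rest => if pvP l then 0 :: (pvPosns rest).map (· + 1) else (pvPosns rest).map (· + 1)

def pvSliceChunks (fs : List String) (es : List Nat) : List (List String) :=
  (es.zip es.tail).map (fun ab => (fs.drop ab.1).take (ab.2 - ab.1))

-- A's loop over the raw lines equals the filtered-lines loop with the metadata branch gone
theorem foldA_filter (ls : List String) (acc : List String × List String) :
    ls.foldl pvStepA acc
      = (((ls.filter
            (fun line => !(pvMeta.any (fun p => PySem.Str.startswith (PySem.Str.rstrip line) p)))).map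
          PySem.Str.rstrip).foldl pvStep2 acc) := by
  induction ls generalizing acc with
  | nil => rfl
  | cons l ls ih =>
    by_cases h : (pvMeta.any (fun p => PySem.Str.startswith (PySem.Str.rstrip l) p)) = true
    · have hA : pvStepA acc l = acc := by
        simp only [pvStepA, h, reduceIte]
      rw [List.foldl_cons, hA, List.filter_cons, if_neg (by rw [h]; simp)]
      exact ih acc
    · have h' : (pvMeta.any (fun p => PySem.Str.startswith (PySem.Str.rstrip l) p)) = false := by
        revert h
        cases pvMeta.any (fun p => PySem.Str.startswith (PySem.Str.rstrip l) p) <;> simp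
      have hA : pvStepA acc l = pvStep2 acc (PySem.Str.rstrip l) := by
        simp only [pvStepA, pvStep2, pvP, pvG, h']
        rw [if_neg Bool.false_ne_true]
      rw [List.foldl_cons, hA, List.filter_cons, if_pos (by rw [h']; rfl), List.map_cons,
        List.foldl_cons]
      exact ih _

theorem foldA_filtered (content : String) :
    (PySem.Str.splitlines content).foldl pvStepA (([] : List String), ([] : List String))
      = (pvFiltered content).foldl pvStep2 ([], []) := by
  rw [foldA_filter]; rfl

-- the accumulator loop computes exactly the recursive chunking
theorem fold_chunks (rest : List String) (secs cur : List String) (h : cur ≠ []) :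
    pvFinalize (rest.foldl pvStep2 (secs, cur)) = secs ++ (pvChunksRec cur rest).map pvG := by
  induction rest generalizing secs cur with
  | nil =>
    have hne : cur.isEmpty = false := by simpa [List.isEmpty_iff] using h
    simp [pvFinalize, pvChunksRec, hne]
  | cons l rest ih =>
    have hne : cur.isEmpty = false := by simpa [List.isEmpty_iff] using h
    by_cases hp : pvP l = true
    · have hs : pvStep2 (secs, cur) l = (secs ++ [pvG cur], [l]) := by
        simp only [pvStep2, hp, hne, Bool.not_false, Bool.and_self, reduceIte]
    -- note: projections (secs, cur).2 reduce inside simp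
      rw [List.foldl_cons, hs, ih _ _ (by simp)]
      simp [pvChunksRec, hp]
    · have hp' : pvP l = false := by revert hp; cases pvP l <;> simp
      have hs : pvStep2 (secs, cur) l = (secs, cur ++ [l]) := by
        simp [pvStep2, hp']
      rw [List.foldl_cons, hs, ih _ _ (by simp)]
      simp [pvChunksRec, hp']

-- the enumerate/filterMap comprehension computes the boundary positions, shifted by the start
theorem enum_bounds (rest : List String) (s : Int) (hs : 0 < s) :
    (PySem.List.enumerate rest s).filterMap
        (fun il => if PySem.Str.startswith il.2 "Table " && decide (il.1 > 0) then some il.1 else none)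
      = (pvPosns rest).map (fun (k : Nat) => (k : Int) + s) := by
  induction rest generalizing s with
  | nil => simp [PySem.List.enumerate_nil, pvPosns]
  | cons l rest ih =>
    have hdec1 : decide (s > 0) = true := decide_eq_true hs
    rw [PySem.List.enumerate_cons]
    by_cases hp : PySem.Str.startswith l "Table " = true
    · simp only [List.filterMap_cons, hp, hdec1, Bool.and_self, reduceIte]
      rw [ih (s + 1) (by omega)]
      have hpos : pvPosns (l :: rest) = 0 :: (pvPosns rest).map (· + 1) := by
        simp only [pvPosns, pvP, hp, reduceIte]
      rw [hpos]
      simp only [List.map_cons, List.map_map, Nat.cast_zero, zero_add]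
      congr 1
      apply List.map_congr_left
      intro k _
      simp only [Function.comp]
      push_cast
      ring
    · have hp' : PySem.Str.startswith l "Table " = false := by
        revert hp; cases PySem.Str.startswith l "Table " <;> simp
      simp only [List.filterMap_cons, hp', Bool.false_and]
      rw [ih (s + 1) (by omega)]
      have hp2 : pvP l = false := hp'
      have hpos : pvPosns (l :: rest) = (pvPosns rest).map (· + 1) := by
        simp [pvPosns, hp2]
      rw [hpos, List.map_map]
      apply List.map_congr_left
      intro k _
      simp only [Function.comp]
      push_cast
      ring

-- slicing a shifted edge list of cur ++ ys slices ys
theorem sliceChunks_shift (es : List Nat) (cur ys : List String) :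
    pvSliceChunks (cur ++ ys) (es.map (· + cur.length)) = pvSliceChunks ys es := by
  unfold pvSliceChunks
  have htail : (es.map (· + cur.length)).tail = es.tail.map (· + cur.length) := by
    cases es <;> rfl
  rw [htail, List.zip_map, List.map_map]
  apply List.map_congr_left
  rintro ⟨a, b⟩ -
  simp only [Function.comp, Prod.map]
  have h1 : (cur ++ ys).drop (a + cur.length) = ys.drop a := by
    rw [Nat.add_comm, ← List.drop_drop, List.drop_left]
  have h2 : b + cur.length - (a + cur.length) = b - a := by omega
  rw [h1, h2]

theorem sliceChunks_cons_zero (fs : List String) (c : Nat) (t : List Nat) :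
    pvSliceChunks fs (0 :: c :: t) = fs.take c :: pvSliceChunks fs (c :: t) := by
  simp [pvSliceChunks]

-- slicing at the boundary positions computes the recursive chunking
theorem sliceChunks_chunksRec (rest : List String) (cur : List String) :
    pvSliceChunks (cur ++ rest)
        (0 :: (pvPosns rest).map (· + cur.length) ++ [cur.length + rest.length])
      = pvChunksRec cur rest := by
  induction rest generalizing cur with
  | nil => simp [pvSliceChunks, pvPosns, pvChunksRec]
  | cons l rest ih =>
    by_cases hp : pvP l = true
    · have hpos : pvPosns (l :: rest) = 0 :: (pvPosns rest).map (· + 1) := by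
        simp only [pvPosns, hp, reduceIte]
      rw [hpos]
      simp only [List.map_cons, List.length_cons, Nat.zero_add, List.cons_append]
      rw [sliceChunks_cons_zero]
      have hT : (cur.length :: ((((pvPosns rest).map (· + 1)).map (· + cur.length))
            ++ [cur.length + (rest.length + 1)]))
          = ((0 :: (pvPosns rest).map (· + 1) ++ [1 + rest.length]).map (· + cur.length)) := by
        simp only [List.map_append, List.map_cons, List.map_nil, Nat.zero_add, List.cons_append]
        rw [show cur.length + (rest.length + 1) = 1 + rest.length + cur.length by omega]
      rw [hT, sliceChunks_shift]
      have hIH := ih [l]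
      simp only [List.singleton_append, List.length_singleton] at hIH
      rw [List.take_left, hIH]
      simp [pvChunksRec, hp]
    · have hp' : pvP l = false := by revert hp; cases pvP l <;> simp
      have hpos : pvPosns (l :: rest) = (pvPosns rest).map (· + 1) := by
        simp [pvPosns, hp']
      rw [hpos]
      have happ : cur ++ l :: rest = (cur ++ [l]) ++ rest := by simp
      rw [happ]
      have hmaps : ((pvPosns rest).map (· + 1)).map (· + cur.length)
          = (pvPosns rest).map (· + (cur ++ [l]).length) := by
        rw [List.map_map]
        apply List.map_congr_left
        intro k _
        simp only [Function.comp, List.length_append, List.length_cons, List.length_nil]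
        omega
      have hlast : cur.length + (l :: rest).length = (cur ++ [l]).length + rest.length := by
        simp only [List.length_append, List.length_cons, List.length_nil]
        omega
      rw [hmaps, hlast, ih (cur ++ [l])]
      simp [pvChunksRec, hp']

-- bridge from B's integer slices to pvSliceChunks
theorem intSlices_eq (fs : List String) (ns : List Nat) :
    (((ns.map (fun (k : Nat) => (k : Int))).zip ((ns.map (fun (k : Nat) => (k : Int))).tail)).map
        (fun ab => PySem.List.slice fs (some ab.1) (some ab.2)))
      = pvSliceChunks fs ns := by
  have htail : (ns.map (fun (k : Nat) => (k : Int))).tail = ns.tail.map (fun (k : Nat) => (k : Int)) := by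
    cases ns <;> rfl
  rw [htail, List.zip_map, List.map_map]
  unfold pvSliceChunks
  apply List.map_congr_left
  rintro ⟨a, b⟩ -
  simp only [Function.comp, Prod.map]
  rw [PySem.List.slice_natCast]

-- core equivalence over an arbitrary filtered line list
theorem pvCore (fs : List String) :
    (pvFinalize (fs.foldl pvStep2 ([], []))).filter (fun s => decide (s ≠ ""))
      = (((((0 : Int) :: ((PySem.List.enumerate fs 0).filterMap
              (fun il => if PySem.Str.startswith il.2 "Table " && decide (il.1 > 0) then some il.1 else none))
            ++ [(fs.length : Int)]).zip
           (((0 : Int) :: ((PySem.List.enumerate fs 0).filterMap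
              (fun il => if PySem.Str.startswith il.2 "Table " && decide (il.1 > 0) then some il.1 else none))
            ++ [(fs.length : Int)]).tail)).map
          (fun ab => PySem.List.slice fs (some ab.1) (some ab.2))).map
          (fun chunk => PySem.Str.strip (PySem.Str.join "\n" chunk))).filter
        (fun s => decide (s ≠ "")) := by
  cases fs with
  | nil => decide
  | cons f0 rest =>
    have h0 : pvStep2 ([], []) f0 = ([], [f0]) := by
      simp [pvStep2]
    rw [List.foldl_cons, h0, fold_chunks rest [] [f0] (by simp)]
    have hnone : decide ((0 : Int) > 0) = false := by rfl
    have hb : (PySem.List.enumerate (f0 :: rest) 0).filterMap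
          (fun il => if PySem.Str.startswith il.2 "Table " && decide (il.1 > 0) then some il.1 else none)
        = (pvPosns rest).map (fun (k : Nat) => (k : Int) + 1) := by
      rw [PySem.List.enumerate_cons]
      simp only [List.filterMap_cons, hnone, Bool.and_false, zero_add]
      exact enum_bounds rest 1 one_pos
    rw [hb]
    have hedges : (((0 : Int) :: (pvPosns rest).map (fun (k : Nat) => (k : Int) + 1))
          ++ [(((f0 :: rest).length : Nat) : Int)])
        = ((0 :: (pvPosns rest).map (· + 1) ++ [1 + rest.length]).map (fun (k : Nat) => (k : Int))) := by
      have hmap2 : (pvPosns rest).map (fun (k : Nat) => (k : Int) + 1)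
          = ((pvPosns rest).map (· + 1)).map (fun (k : Nat) => (k : Int)) := by
        rw [List.map_map]
        apply List.map_congr_left
        intro k _
        simp only [Function.comp]
        push_cast
        ring
      rw [hmap2]
      rw [show (((f0 :: rest).length : Nat) : Int) = ((1 + rest.length : Nat) : Int) by
        simp only [List.length_cons]; push_cast; ring]
      simp only [List.map_append, List.map_cons, List.map_nil, Nat.cast_zero]
    rw [hedges, intSlices_eq]
    have hsc := sliceChunks_chunksRec rest [f0]
    simp only [List.singleton_append, List.length_singleton] at hsc
    rw [hsc]
    simp only [List.nil_append]
    rfl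

-- ===== VERDICT (by name: the statement is the Claim_ definition above) =====
theorem split_rendered_tables_py_spec : Claim_equal_split_rendered_tables_py := by
  intro content _
  unfold Spec_split_rendered_tables_py
  simp only [split_rendered_tables_py, split_rendered_tables_py_alt]
  rw [foldA_filtered]
  have h := pvCore (pvFiltered content)
  simp only [pvFinalize, pvG] at h
  exact h
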